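-- pv_equiv track=rewrite | github.com/jrober84/parsityper | parsityper/composer.py | init_skip_regions
-- ===== SOURCE A (Python) =====
-- def init_skip_regions(consensus_seqs):
--     key = list(consensus_seqs.keys())[0]
--     aln_len = len(consensus_seqs[key])
--     aln_skip = [0] * aln_len
--     aln_range = range(0,aln_len)
--     for seq_id in consensus_seqs:
--         for i in aln_range:
--             if consensus_seqs[seq_id][i] != '-':
--                 aln_skip[i] = 1
--     for i in aln_range:
--         if aln_skip[i] == 1:
--             aln_skip[i] = 0
--         else:
--             aln_skip[i] = 1
--
--     return aln_skip
-- ===== SOURCE B (Python) =====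
-- def init_skip_regions(consensus_seqs):
--     key = list(consensus_seqs.keys())[0]
--     aln_len = len(consensus_seqs[key])
--     return [1 if all(consensus_seqs[seq_id][i] == '-' for seq_id in consensus_seqs) else 0
--             for i in range(0, aln_len)]
-- ===== Notes on version B (the rewrite author's own statement) =====
-- stated objective: simpler
-- what changed: B computes each column's flag directly with a short-circuiting all() over sequences (column loop outer), instead of A's mark-then-invert: no accumulator array mutated across sequences and no second inversion pass.
import Mathlib
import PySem

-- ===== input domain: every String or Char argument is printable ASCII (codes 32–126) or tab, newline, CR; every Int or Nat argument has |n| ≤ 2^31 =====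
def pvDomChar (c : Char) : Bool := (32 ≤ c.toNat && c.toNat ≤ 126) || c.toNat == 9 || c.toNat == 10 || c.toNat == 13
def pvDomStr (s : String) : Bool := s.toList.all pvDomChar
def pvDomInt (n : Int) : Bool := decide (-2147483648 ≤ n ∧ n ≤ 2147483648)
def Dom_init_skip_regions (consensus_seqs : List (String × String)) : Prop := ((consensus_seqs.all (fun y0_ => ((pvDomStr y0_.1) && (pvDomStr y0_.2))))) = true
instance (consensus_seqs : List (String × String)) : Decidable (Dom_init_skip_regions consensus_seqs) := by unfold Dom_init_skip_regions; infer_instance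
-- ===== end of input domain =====

-- B flags an all-gap column directly with a short-circuiting all() per column instead of A's
-- mark-then-invert accumulator array (objective: simpler). Return-value equivalence only.

-- dict lookup (first match; Python dicts have unique keys)
def pvLookup (cs : List (String × String)) (k : String) : String :=
  match cs with
  | [] => ""
  | (k', v) :: rest => if k' == k then v else pvLookup rest k

-- consensus_seqs[seq_id][i]; in range on every input admitted by Pre_ (Python raises otherwise)
def pvChar (cs : List (String × String)) (k : String) (i : Nat) : Char :=
  (pvLookup cs k).toList.getD i ' '

-- ===== PORT A =====
def init_skip_regions (consensus_seqs : List (String × String)) : List Int :=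
  match consensus_seqs with
  | [] => []  -- list(consensus_seqs.keys())[0] raises IndexError (excluded by Pre_)
  | (key, _) :: _ =>
    let aln_len := (pvLookup consensus_seqs key).toList.length
    let aln_skip : List Int := List.replicate aln_len 0
    let marked := consensus_seqs.foldl (fun acc p =>
      (List.range aln_len).foldl (fun acc2 i =>
        if pvChar consensus_seqs p.1 i != '-' then acc2.set i 1 else acc2) acc) aln_skip
    (List.range aln_len).foldl (fun acc i =>
      if acc.getD i 0 == 1 then acc.set i 0 else acc.set i 1) marked

-- ===== PORT B =====
def init_skip_regions_alt (consensus_seqs : List (String × String)) : List Int :=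
  match consensus_seqs with
  | [] => []  -- IndexError (excluded by Pre_)
  | (key, _) :: _ =>
    let aln_len := (pvLookup consensus_seqs key).toList.length
    (List.range aln_len).map (fun i =>
      if consensus_seqs.all (fun p => pvChar consensus_seqs p.1 i == '-') then (1 : Int) else 0)

-- ===== PRECONDITION & SPEC =====
-- Pre_ excludes exactly the inputs where the Python A raises IndexError: the empty dict, and
-- dicts where some looked-up sequence is shorter than the first one.
def Pre_init_skip_regions (consensus_seqs : List (String × String)) : Prop :=
  consensus_seqs ≠ [] ∧
  ∀ p ∈ consensus_seqs,
    (consensus_seqs.headD ("", "")).2.toList.length ≤ p.2.toList.length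
instance (consensus_seqs : List (String × String)) : Decidable (Pre_init_skip_regions consensus_seqs) := by unfold Pre_init_skip_regions; infer_instance
def pvWitness_init_skip_regions : (List (String × String)) := [("s1", "a-c"), ("s2", "--c")]
def Spec_init_skip_regions (consensus_seqs : List (String × String)) (out : List Int) : Prop := out = init_skip_regions_alt consensus_seqs
instance (consensus_seqs : List (String × String)) (out : List Int) : Decidable (Spec_init_skip_regions consensus_seqs out) := by unfold Spec_init_skip_regions; infer_instance

-- ===== CLAIM (what is proved, stated in full; the proofs are below) =====
def Claim_equal_init_skip_regions : Prop := ∀ (consensus_seqs : List (String × String)), Dom_init_skip_regions consensus_seqs → Pre_init_skip_regions consensus_seqs → Spec_init_skip_regions consensus_seqs (init_skip_regions consensus_seqs)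

-- ===== LEMMAS AND PROOFS =====

theorem pv_getD_set_ne (l : List Int) (i j : Nat) (v : Int) (h : i ≠ j) :
    (l.set i v).getD j 0 = l.getD j 0 := by
  simp [List.getD, List.getElem?_set_ne h]

theorem pv_getD_set_eq (l : List Int) (i : Nat) (v : Int) (h : i < l.length) :
    (l.set i v).getD i 0 = v := by
  simp [List.getD, h]

-- length is preserved by any fold whose step only uses List.set
theorem setfold_length (n : Nat) (f : List Int → Nat → List Int)
    (hf : ∀ a i, (f a i).length = a.length) (acc : List Int) :
    ((List.range n).foldl f acc).length = acc.length := by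
  induction n generalizing acc with
  | zero => simp
  | succ m ih => simp [List.range_succ, hf, ih]

-- elementwise value of the marking inner loop
theorem markfold_getD (c : Nat → Bool) :
    ∀ (n : Nat) (acc : List Int) (j : Nat),
      ((List.range n).foldl (fun a i => if c i then a.set i 1 else a) acc).getD j 0
        = if j < n ∧ c j ∧ j < acc.length then 1 else acc.getD j 0 := by
  intro n
  induction n with
  | zero => intro acc j; simp
  | succ m ih =>
    intro acc j
    rw [List.range_succ, List.foldl_append]
    have hlen : ((List.range m).foldl (fun a i => if c i then a.set i 1 else a) acc).length
        = acc.length := by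
      apply setfold_length; intro a i; split <;> simp
    simp only [List.foldl_cons, List.foldl_nil]
    by_cases hcm : c m
    · simp only [hcm, if_pos]
      rcases Nat.lt_trichotomy j m with hj | hj | hj
      · rw [pv_getD_set_ne _ _ _ _ (by omega), ih]
        by_cases hja : j < acc.length <;> simp [hj, hja, Nat.lt_succ_of_lt hj]
      · subst hj
        by_cases hja : j < acc.length
        · rw [pv_getD_set_eq _ _ _ (by omega)]
          simp [hcm, hja]
        · rw [List.set_eq_of_length_le (by omega), ih]
          simp [hja]
      · rw [pv_getD_set_ne _ _ _ _ (by omega), ih]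
        have h1 : ¬ j < m := by omega
        have h2 : ¬ j < m + 1 := by omega
        simp [h1, h2]
    · simp only [hcm, Bool.false_eq_true, if_false]
      rw [ih]
      by_cases hjm : j = m
      · subst hjm; simp [hcm]
      · have : (j < m + 1) ↔ (j < m) := by omega
        simp [this]

-- elementwise value of the whole marking pass (outer fold over the sequences)
theorem outer_getD (cs : List (String × String)) (n : Nat) :
    ∀ (l : List (String × String)) (acc : List Int) (j : Nat),
      ((l.foldl (fun acc p =>
          (List.range n).foldl (fun a i =>
            if pvChar cs p.1 i != '-' then a.set i 1 else a) acc) acc).getD j 0)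
        = if (l.any (fun p => pvChar cs p.1 j != '-')) ∧ j < n ∧ j < acc.length
          then 1 else acc.getD j 0 := by
  intro l
  induction l with
  | nil => intro acc j; simp
  | cons p rest ih =>
    intro acc j
    simp only [List.foldl_cons]
    rw [ih]
    have hlen : ((List.range n).foldl (fun a i =>
        if pvChar cs p.1 i != '-' then a.set i 1 else a) acc).length = acc.length := by
      apply setfold_length; intro a i; split <;> simp
    rw [hlen, markfold_getD]
    by_cases hc : pvChar cs p.1 j != '-' <;> by_cases hjn : j < n <;>
      by_cases hja : j < acc.length <;>
      by_cases hr : rest.any (fun p => pvChar cs p.1 j != '-') = true <;>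
      simp [hc, hjn, hja, hr]

-- elementwise value of the inversion pass
theorem invfold_getD :
    ∀ (n : Nat) (acc : List Int) (j : Nat), n ≤ acc.length →
      ((List.range n).foldl (fun a i => if a.getD i 0 == 1 then a.set i 0 else a.set i 1) acc).getD j 0
        = if j < n then (if acc.getD j 0 == 1 then 0 else 1) else acc.getD j 0 := by
  intro n
  induction n with
  | zero => intro acc j _; simp
  | succ m ih =>
    intro acc j h
    rw [List.range_succ, List.foldl_append]
    simp only [List.foldl_cons, List.foldl_nil]
    have hlen : ((List.range m).foldl
        (fun a i => if a.getD i 0 == 1 then a.set i 0 else a.set i 1) acc).length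
        = acc.length := by
      apply setfold_length; intro a i; split <;> simp
    have hm : ((List.range m).foldl
        (fun a i => if a.getD i 0 == 1 then a.set i 0 else a.set i 1) acc).getD m 0
        = acc.getD m 0 := by
      rw [ih acc m (by omega)]; simp
    rw [hm]
    by_cases hjm : j = m
    · subst hjm
      by_cases hb : acc.getD j 0 == 1 <;>
        simp only [hb, if_pos, Bool.false_eq_true, if_false] <;>
        rw [pv_getD_set_eq _ _ _ (by omega)] <;> simp
    · by_cases hb : acc.getD m 0 == 1 <;>
        simp only [hb, if_pos, Bool.false_eq_true, if_false] <;>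
        rw [pv_getD_set_ne _ _ _ _ (by omega), ih acc j (by omega)] <;>
        · have : (j < m + 1) ↔ (j < m) := by omega
          simp [this]

-- length of the whole marking pass
theorem outer_length (cs : List (String × String)) (n : Nat) :
    ∀ (l : List (String × String)) (acc : List Int),
      ((l.foldl (fun acc p =>
          (List.range n).foldl (fun a i =>
            if pvChar cs p.1 i != '-' then a.set i 1 else a) acc) acc).length) = acc.length := by
  intro l
  induction l with
  | nil => intro acc; simp
  | cons p rest ih =>
    intro acc
    simp only [List.foldl_cons]
    rw [ih, setfold_length _ _ (fun a i => by split <;> simp)]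

-- any (≠ '-') is the negation of all (= '-')
theorem any_ne_eq_not_all_eq (cs l : List (String × String)) (j : Nat) :
    (l.any (fun p => pvChar cs p.1 j != '-'))
      = !(l.all (fun p => pvChar cs p.1 j == '-')) := by
  induction l with
  | nil => simp
  | cons p rest ih => simp [List.any_cons, List.all_cons, Bool.not_and, bne, ← ih]

-- ===== VERDICT (by name: the statement is the Claim_ definition above) =====
theorem init_skip_regions_spec : Claim_equal_init_skip_regions := by
  unfold Claim_equal_init_skip_regions
  intro cs _ hpre
  unfold Spec_init_skip_regions
  obtain ⟨hne, -⟩ := hpre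
  match cs with
  | [] => exact absurd rfl hne
  | (key, v) :: rest =>
    simp only [init_skip_regions, init_skip_regions_alt]
    set cs := (key, v) :: rest with hcs
    set n := (pvLookup cs key).toList.length with hn
    set marked := cs.foldl (fun acc p =>
        (List.range n).foldl (fun a i =>
          if pvChar cs p.1 i != '-' then a.set i 1 else a) acc)
        (List.replicate n (0 : Int)) with hmarked
    have hlen_mark : marked.length = n := by
      rw [hmarked, outer_length]; simp
    have hlen_inv : ((List.range n).foldl
        (fun acc i => if acc.getD i 0 == 1 then acc.set i 0 else acc.set i 1) marked).length
        = n := by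
      exact (setfold_length n _ (fun a i => by split <;> simp) marked).trans hlen_mark
    apply List.ext_getElem
    · rw [hlen_inv]; simp
    · intro j h1 h2
      rw [← List.getD_eq_getElem _ 0 h1, ← List.getD_eq_getElem _ 0 h2]
      have hj : j < n := by omega
      have hmarkj : marked.getD j 0
          = if cs.any (fun p => pvChar cs p.1 j != '-') then 1 else 0 := by
        rw [hmarked, outer_getD]
        have hcond : ((cs.any fun p => pvChar cs p.1 j != '-') = true ∧ j < n ∧ j < (List.replicate n (0:Int)).length) ↔ (cs.any fun p => pvChar cs p.1 j != '-') = true := by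
          simp only [List.length_replicate]
          exact and_iff_left ⟨hj, hj⟩
        rw [if_congr hcond rfl rfl]
        simp [hj]
      rw [invfold_getD n marked j (by omega), if_pos hj, hmarkj]
      rw [List.getD_eq_getElem _ 0 (by simpa using h2)]
      rw [List.getElem_map, List.getElem_range]
      rw [any_ne_eq_not_all_eq]
      by_cases hall : cs.all (fun p => pvChar cs p.1 j == '-') <;> simp [hall]
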